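-- pv_equiv track=rewrite | github.com/vladzhra/LazyTrader-AI-Hackaton | main.py | parse_advice
-- ===== SOURCE A (Python) =====
-- def parse_advice(text):
--     action, confidence, reason = "HOLD", "MEDIUM", ""
--     for line in text.splitlines():
--         line = line.strip()
--         if line.upper().startswith("ACTION:"):
--             action = line.split(":", 1)[1].strip().upper()
--         elif line.upper().startswith("CONFIDENCE:"):
--             confidence = line.split(":", 1)[1].strip().upper()
--         elif line.upper().startswith("REASON:"):
--             reason = line.split(":", 1)[1].strip()
--     return action, confidence, reason
-- ===== SOURCE B (Python) =====
-- def parse_advice(text):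
--     fields = {}
--     for line in text.splitlines():
--         parts = line.strip().split(":", 1)
--         if len(parts) == 2:
--             fields[parts[0].upper()] = parts[1]
--     return (fields.get("ACTION", "HOLD").strip().upper(),
--             fields.get("CONFIDENCE", "MEDIUM").strip().upper(),
--             fields.get("REASON", "").strip())
-- ===== Notes on version B (the rewrite author's own statement) =====
-- stated objective: idiomatic
-- what changed: Replaces A's three per-line startswith-prefix tests updating three string accumulators by a single generic 'split each stripped line on its first colon into a dict' pass, with the three fields, their defaults and the case-normalisation derived once from the dict after the loop.
import Mathlib
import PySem

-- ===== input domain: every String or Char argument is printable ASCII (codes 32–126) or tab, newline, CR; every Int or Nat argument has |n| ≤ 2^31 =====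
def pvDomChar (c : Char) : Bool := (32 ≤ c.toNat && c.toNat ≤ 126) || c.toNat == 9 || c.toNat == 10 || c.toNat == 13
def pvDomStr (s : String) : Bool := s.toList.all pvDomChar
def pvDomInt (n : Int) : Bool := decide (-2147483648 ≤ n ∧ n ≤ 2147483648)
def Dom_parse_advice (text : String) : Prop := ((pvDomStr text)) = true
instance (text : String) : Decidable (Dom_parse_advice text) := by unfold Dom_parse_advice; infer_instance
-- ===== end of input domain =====

-- B replaces A's three prefix-tested accumulators by a single 'split on first colon' dict pass
-- with the defaults and case-normalisation applied once at the end (objective: idiomatic).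

-- ===== PORT A =====
-- step of A's for-loop: three startswith branches updating the (action, confidence, reason) triple
def pvStepA (st : String × String × String) (line : String) : String × String × String :=
  let l := PySem.Str.strip line
  if PySem.Str.startswith (PySem.Str.upper l) "ACTION:" then
    (PySem.Str.upper (PySem.Str.strip ((PySem.List.pyGet? ((PySem.Str.splitMax? l ":" 1).getD []) 1).getD "")), st.2.1, st.2.2)
  else if PySem.Str.startswith (PySem.Str.upper l) "CONFIDENCE:" then
    (st.1, PySem.Str.upper (PySem.Str.strip ((PySem.List.pyGet? ((PySem.Str.splitMax? l ":" 1).getD []) 1).getD "")), st.2.2)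
  else if PySem.Str.startswith (PySem.Str.upper l) "REASON:" then
    (st.1, st.2.1, PySem.Str.strip ((PySem.List.pyGet? ((PySem.Str.splitMax? l ":" 1).getD []) 1).getD ""))
  else st

def parse_advice (text : String) : String × String × String :=
  (PySem.Str.splitlines text).foldl pvStepA ("HOLD", "MEDIUM", "")

-- ===== PORT B =====
-- step of B's for-loop: split the stripped line on the first ':' and record the field in a dict
def pvStepB (d : PySem.Dict String String) (line : String) : PySem.Dict String String :=
  let parts := (PySem.Str.splitMax? (PySem.Str.strip line) ":" 1).getD []
  if parts.length == 2 then
    d.insert (PySem.Str.upper ((PySem.List.pyGet? parts 0).getD "")) ((PySem.List.pyGet? parts 1).getD "")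
  else d

def parse_advice_alt (text : String) : String × String × String :=
  let fields := (PySem.Str.splitlines text).foldl pvStepB PySem.Dict.empty
  (PySem.Str.upper (PySem.Str.strip (fields.getD "ACTION" "HOLD")),
   PySem.Str.upper (PySem.Str.strip (fields.getD "CONFIDENCE" "MEDIUM")),
   PySem.Str.strip (fields.getD "REASON" ""))

-- ===== PRECONDITION & SPEC =====
def Spec_parse_advice (text : String) (out : String × String × String) : Prop := out = parse_advice_alt text
instance (text : String) (out : String × String × String) : Decidable (Spec_parse_advice text out) := by unfold Spec_parse_advice; infer_instance

-- ===== CLAIM (what is proved, stated in full; the proofs are below) =====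
def Claim_equal_parse_advice : Prop := ∀ (text : String), Dom_parse_advice text → Spec_parse_advice text (parse_advice text)

-- ===== LEMMAS AND PROOFS =====

-- read the three fields (with defaults and normalisation) out of B's dict
def pvExtract (d : PySem.Dict String String) : String × String × String :=
  (PySem.Str.upper (PySem.Str.strip (d.getD "ACTION" "HOLD")),
   PySem.Str.upper (PySem.Str.strip (d.getD "CONFIDENCE" "MEDIUM")),
   PySem.Str.strip (d.getD "REASON" ""))

-- `go` with maxsplit budget 0 returns the remainder as the last piece, whatever the fuel
theorem pvGo_zero (fuel : Nat) (l cur : List Char) (acc : List (List Char)) :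
    PySem.Chars.splitOnMax.go [':'] fuel 0 l cur acc = ((cur.reverse ++ l) :: acc).reverse := by
  cases fuel with
  | zero => rfl
  | succ fuel => cases l with
    | nil => simp [PySem.Chars.splitOnMax.go]
    | cons c rest => simp [PySem.Chars.splitOnMax.go]

-- `go` with budget 1 splits at the first ':' (if any), whatever the sufficient fuel
theorem pvGo_one (fuel : Nat) (l cur : List Char) (acc : List (List Char))
    (h : l.length < fuel) :
    PySem.Chars.splitOnMax.go [':'] fuel 1 l cur acc =
      acc.reverse ++
        (if ':' ∈ l then
          [cur.reverse ++ l.takeWhile (· ≠ ':'), (l.dropWhile (· ≠ ':')).tail]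
         else [cur.reverse ++ l]) := by
  induction fuel generalizing l cur acc with
  | zero => omega
  | succ fuel ih =>
    cases l with
    | nil => simp [PySem.Chars.splitOnMax.go]
    | cons c rest =>
      by_cases hc : c = ':'
      · subst hc
        simp only [PySem.Chars.splitOnMax.go, List.isPrefixOf]
        simp [pvGo_zero, List.takeWhile, List.dropWhile]
      · have hpre : ([':'].isPrefixOf (c :: rest)) = false := by
          simp [List.isPrefixOf]; exact fun h => absurd h.symm hc
        simp only [PySem.Chars.splitOnMax.go]
        rw [if_neg (by omega : ¬ (1 : Nat) = 0), hpre]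
        simp only [Bool.false_eq_true, if_false]
        rw [ih rest (c :: cur) acc (by simpa using Nat.lt_of_succ_lt_succ h)]
        simp [List.takeWhile, List.dropWhile, hc, List.mem_cons,
          or_iff_right (fun h' => hc h'.symm : ¬ ':' = c)]

-- characterisation of s.split(":", 1)
theorem pvSplit1 (s : String) :
    PySem.Str.splitMax? s ":" 1 =
      some (if ':' ∈ s.toList then
              [String.ofList (s.toList.takeWhile (· ≠ ':')),
               String.ofList ((s.toList.dropWhile (· ≠ ':')).tail)]
            else [s]) := by
  simp only [PySem.Str.splitMax?, PySem.Chars.splitMax?, PySem.Chars.splitOnMax,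
    show (":".toList : List Char) = [':'] from rfl, Int.toNat_one]
  rw [if_neg (by decide), if_neg (by decide)]
  rw [pvGo_one (s.toList.length + 1) s.toList [] [] (Nat.lt_succ_self _)]
  by_cases h : ':' ∈ s.toList <;> simp [h, String.ofList_toList]

theorem pvOfNatAux (n : Nat) (h : n.isValidChar) : (Char.ofNatAux n h).toNat = n := by
  cases h with
  | inl h => simp [Char.ofNatAux, Char.toNat]
  | inr h => simp [Char.ofNatAux, Char.toNat]

theorem pvUpperChar_colon (c : Char) (he : PySem.Chars.upperChar c = ':') : c = ':' := by
  by_contra hne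
  unfold PySem.Chars.upperChar PySem.Chars.islower at he
  split_ifs at he with h
  · simp only [Bool.and_eq_true, decide_eq_true_eq, Char.le_def, UInt32.le_iff_toNat_le] at h
    have h1 : 97 ≤ c.toNat := h.1
    have h2 : c.toNat ≤ 122 := h.2
    have hv : (Char.ofNat (c.toNat - 32)).toNat = 58 := by rw [he]; rfl
    rw [show Char.ofNat (c.toNat - 32) = Char.ofNatAux (c.toNat - 32) (Or.inl (by omega)) by
      unfold Char.ofNat; rw [dif_pos]] at hv
    rw [pvOfNatAux] at hv
    omega
  · exact hne he

theorem pvMem_colon_upper (l : List Char) : ':' ∈ PySem.Chars.upper l ↔ ':' ∈ l := by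
  unfold PySem.Chars.upper
  constructor
  · intro h
    obtain ⟨c, hc, he⟩ := List.mem_map.mp h
    rwa [pvUpperChar_colon c he] at hc
  · intro h
    exact List.mem_map.mpr ⟨':', h, by decide⟩

theorem pvTakeWhile_colon (u v : List Char) (hu : ':' ∉ u) :
    (u ++ ':' :: v).takeWhile (· ≠ ':') = u := by
  induction u with
  | nil => simp
  | cons c u ih =>
    have hc : c ≠ ':' := fun h => hu (h ▸ List.mem_cons_self)
    have hu' : ':' ∉ u := fun h => hu (List.mem_cons_of_mem _ h)
    simp only [List.cons_append, List.takeWhile_cons, hc, ne_eq,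
      not_false_eq_true, decide_true, if_true, ih hu']

theorem pvDropWhile_colon (l : List Char) (h : ':' ∈ l) :
    l.dropWhile (· ≠ ':') = ':' :: (l.dropWhile (· ≠ ':')).tail := by
  induction l with
  | nil => cases h
  | cons c rest ih =>
    by_cases hc : c = ':'
    · subst hc; simp
    · have hr : ':' ∈ rest := by
        rcases List.mem_cons.mp h with h' | h'
        · exact absurd h'.symm hc
        · exact h'
      simp only [List.dropWhile_cons, ne_eq, hc, not_false_eq_true, decide_true, if_true]
      exact ih hr

theorem pvPrefix_key (key u v : List Char) (hu : ':' ∉ u) (hk : ':' ∉ key) :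
    ((key ++ [':']) <+: (u ++ ':' :: v)) ↔ u = key := by
  constructor
  · rintro ⟨t, ht⟩
    have h1 : (u ++ ':' :: v).takeWhile (· ≠ ':') = u := pvTakeWhile_colon u v hu
    have h2 : (key ++ ':' :: t).takeWhile (· ≠ ':') = key := pvTakeWhile_colon key t hk
    rw [show key ++ [':'] ++ t = key ++ ':' :: t by simp] at ht
    rw [← ht, h2] at h1
    exact h1.symm
  · rintro rfl
    exact ⟨v, by simp⟩

theorem pvStrEq (a b : String) (h : a.toList = b.toList) : a = b := by
  have := congrArg String.ofList h
  rwa [String.ofList_toList, String.ofList_toList] at this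

theorem pvStep_agree (d : PySem.Dict String String) (line : String) :
    pvStepA (pvExtract d) line = pvExtract (pvStepB d line) := by
  simp only [pvStepA, pvStepB]
  rw [pvSplit1 (PySem.Str.strip line)]
  set s := PySem.Str.strip line with hs
  by_cases hcol : ':' ∈ s.toList
  · simp only [hcol, if_true, Option.getD_some]
    set before := s.toList.takeWhile (· ≠ ':') with hb
    set after := (s.toList.dropWhile (· ≠ ':')).tail with ha
    have hno : ':' ∉ before := fun hm => by simpa using List.mem_takeWhile_imp hm
    have hdec : s.toList = before ++ ':' :: after := by
      conv_lhs => rw [← List.takeWhile_append_dropWhile (p := (· ≠ ':')) (l := s.toList)]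
      rw [pvDropWhile_colon s.toList hcol]
    set ub := PySem.Chars.upper before with hubdef
    have hub : (PySem.Str.upper s).toList = ub ++ ':' :: PySem.Chars.upper after := by
      rw [PySem.Str.toList_upper, hdec]
      simp only [PySem.Chars.upper, List.map_append, List.map_cons, hubdef,
        show PySem.Chars.upperChar ':' = ':' by decide]
    have hnoub : ':' ∉ ub := fun h => hno ((pvMem_colon_upper before).mp h)
    have hcond : ∀ (key keyc : String), keyc.toList = key.toList ++ [':'] → ':' ∉ key.toList →
        ((PySem.Str.startswith (PySem.Str.upper s) keyc) = true ↔ ub = key.toList) := by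
      intro key keyc hkc hk
      rw [PySem.Str.startswith_eq, PySem.Chars.startswith_iff, hkc, hub]
      exact pvPrefix_key key.toList ub (PySem.Chars.upper after) hnoub hk
    have hA := hcond "ACTION" "ACTION:" (by decide) (by decide)
    have hC := hcond "CONFIDENCE" "CONFIDENCE:" (by decide) (by decide)
    have hR := hcond "REASON" "REASON:" (by decide) (by decide)
    have hget0 : PySem.List.pyGet? [String.ofList before, String.ofList after] (0 : Int)
        = some (String.ofList before) := by simp [PySem.List.pyGet?, PySem.List.pyIdx?]
    have hget1 : PySem.List.pyGet? [String.ofList before, String.ofList after] (1 : Int)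
        = some (String.ofList after) := by simp [PySem.List.pyGet?, PySem.List.pyIdx?]
    have hlen : (([String.ofList before, String.ofList after].length == 2)) = true := by
      simp
    have hkey : PySem.Str.upper (String.ofList before) = String.ofList ub := by
      apply pvStrEq
      rw [PySem.Str.toList_upper, String.toList_ofList, String.toList_ofList]
    have hkeyeq : ∀ (w : String), (w = String.ofList ub ↔ ub = w.toList) := by
      intro w
      constructor
      · intro h; rw [h, String.toList_ofList]
      · intro h; apply pvStrEq; rw [String.toList_ofList, h]
    simp only [hget0, hget1, Option.getD_some, hkey, hlen, if_true]
    by_cases h1 : ub = "ACTION".toList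
    · rw [if_pos (hA.mpr h1)]
      simp only [pvExtract]
      rw [PySem.Dict.getD_insert, PySem.Dict.getD_insert, PySem.Dict.getD_insert]
      rw [if_pos ((hkeyeq "ACTION").mpr h1),
          if_neg (fun h => by rw [(hkeyeq "CONFIDENCE").mp h] at h1; exact absurd h1 (by decide)),
          if_neg (fun h => by rw [(hkeyeq "REASON").mp h] at h1; exact absurd h1 (by decide))]
    · rw [if_neg (fun h => h1 (hA.mp h))]
      by_cases h2 : ub = "CONFIDENCE".toList
      · rw [if_pos (hC.mpr h2)]
        simp only [pvExtract]
        rw [PySem.Dict.getD_insert, PySem.Dict.getD_insert, PySem.Dict.getD_insert]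
        rw [if_neg (fun h => by rw [(hkeyeq "ACTION").mp h] at h2; exact absurd h2 (by decide)),
            if_pos ((hkeyeq "CONFIDENCE").mpr h2),
            if_neg (fun h => by rw [(hkeyeq "REASON").mp h] at h2; exact absurd h2 (by decide))]
      · rw [if_neg (fun h => h2 (hC.mp h))]
        by_cases h3 : ub = "REASON".toList
        · rw [if_pos (hR.mpr h3)]
          simp only [pvExtract]
          rw [PySem.Dict.getD_insert, PySem.Dict.getD_insert, PySem.Dict.getD_insert]
          rw [if_neg (fun h => by rw [(hkeyeq "ACTION").mp h] at h3; exact absurd h3 (by decide)),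
              if_neg (fun h => by rw [(hkeyeq "CONFIDENCE").mp h] at h3; exact absurd h3 (by decide)),
              if_pos ((hkeyeq "REASON").mpr h3)]
        · rw [if_neg (fun h => h3 (hR.mp h))]
          simp only [pvExtract]
          rw [PySem.Dict.getD_insert, PySem.Dict.getD_insert, PySem.Dict.getD_insert]
          rw [if_neg (fun h => h1 (((hkeyeq "ACTION").mp h))),
              if_neg (fun h => h2 (((hkeyeq "CONFIDENCE").mp h))),
              if_neg (fun h => h3 (((hkeyeq "REASON").mp h)))]
  · have hfalse : ∀ (p : String), ':' ∈ p.toList →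
        PySem.Str.startswith (PySem.Str.upper s) p = false := by
      intro p hp
      rw [PySem.Str.startswith_eq]
      by_contra h
      have h' : PySem.Chars.startswith (PySem.Str.upper s).toList p.toList = true := by
        revert h; cases PySem.Chars.startswith (PySem.Str.upper s).toList p.toList <;> simp
      obtain ⟨t, ht⟩ := (PySem.Chars.startswith_iff _ _).mp h'
      have hm : ':' ∈ (PySem.Str.upper s).toList := by
        rw [← ht]; exact List.mem_append_left _ hp
      rw [PySem.Str.toList_upper] at hm
      exact hcol ((pvMem_colon_upper s.toList).mp hm)
    rw [hfalse "ACTION:" (by decide), hfalse "CONFIDENCE:" (by decide), hfalse "REASON:" (by decide)]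
    simp [hcol]

theorem pvFold_agree (lines : List String) (d : PySem.Dict String String) :
    lines.foldl pvStepA (pvExtract d) = pvExtract (lines.foldl pvStepB d) := by
  induction lines generalizing d with
  | nil => rfl
  | cons x xs ih => simp only [List.foldl_cons, pvStep_agree, ih]

-- ===== VERDICT (by name: the statement is the Claim_ definition above) =====
theorem parse_advice_spec : Claim_equal_parse_advice := by
  intro text _
  unfold Spec_parse_advice parse_advice parse_advice_alt
  have h0 : pvExtract PySem.Dict.empty = ("HOLD", "MEDIUM", "") := by decide
  rw [← h0, pvFold_agree]
  rfl
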